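-- pv_equiv track=rewrite | github.com/shadowwalker2718/PNSEI | python/number_of_islands.py | size_island
-- ===== SOURCE A (Python) =====
-- def size_island(matrix):
--     out = []
--     #if len(matrix) == 0:
--     #    return []
--
--     def dfs(i, j):
--         if matrix[i][j] == 0:
--             return 0
--         d = [[1, 0], [-1, 0], [0, 1], [0, -1]]
--         matrix[i][j] = 0
--         out = 1
--         for di in d:
--             if 0 <= i + di[0] < len(matrix):
--                 if -1 == j + di[1]:
--                     out += dfs(i + di[0], len(matrix[0]) - 1)
--                 elif j + di[1] == len(matrix[0]):
--                     out += dfs(i + di[0], 0)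
--                 else:
--                     out += dfs(i + di[0], j + di[1])
--         return out
--
--     for i in range(len(matrix)):
--         for j in range(len(matrix[0])):
--             if matrix[i][j] == 1:
--                 out += [dfs(i, j)]
--     return out
-- ===== SOURCE B (Python) =====
-- def size_island(matrix):
--     # Iterative flood fill with an explicit stack instead of recursion.
--     # NOTE: like the original, this mutates `matrix` in place (zeroes visited cells).
--     out = []
--     rows = len(matrix)
--     for i in range(rows):
--         for j in range(len(matrix[0])):
--             if matrix[i][j] == 1:
--                 size = 0
--                 stack = [(i, j)]
--                 while stack:
--                     x, y = stack.pop()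
--                     if matrix[x][y] == 0:
--                         continue
--                     matrix[x][y] = 0
--                     size += 1
--                     cols = len(matrix[0])
--                     for dx, dy in ((0, -1), (0, 1), (-1, 0), (1, 0)):
--                         nx = x + dx
--                         if 0 <= nx < rows:
--                             stack.append((nx, (y + dy) % cols))
--                 out.append(size)
--     return out
-- ===== Notes on version B (the rewrite author's own statement) =====
-- stated objective: faster
-- what changed: The recursive DFS helper is replaced by an iterative flood fill with an explicit stack (pop a cell, zero it, push its four neighbours with the same column-wraparound rule), keeping the same row-major scan; this removes per-cell Python function-call/recursion overhead and the recursion-depth limit on large islands.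
import Mathlib
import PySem

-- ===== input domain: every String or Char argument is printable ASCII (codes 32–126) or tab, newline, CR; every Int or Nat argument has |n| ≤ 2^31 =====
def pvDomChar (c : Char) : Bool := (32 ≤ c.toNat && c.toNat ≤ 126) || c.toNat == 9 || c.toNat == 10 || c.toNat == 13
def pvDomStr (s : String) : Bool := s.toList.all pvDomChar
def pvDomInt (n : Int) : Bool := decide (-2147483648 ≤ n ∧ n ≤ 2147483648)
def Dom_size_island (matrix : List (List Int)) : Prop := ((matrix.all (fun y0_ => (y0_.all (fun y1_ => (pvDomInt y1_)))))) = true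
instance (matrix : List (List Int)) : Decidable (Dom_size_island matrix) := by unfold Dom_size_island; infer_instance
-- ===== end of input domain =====

-- B replaces A's recursive DFS by an iterative explicit-stack flood fill (same scan order,
-- same column-wraparound neighbours); both Pythons mutate `matrix` in place identically,
-- the equivalence proved here is about the return value.

-- ===== PORT A =====
-- shared indexing helpers: `matrix[i][j]` read (0 where Python would raise IndexError —
-- Pre_ excludes those inputs) and the assignment `matrix[i][j] = v`
def pvGetCell (m : List (List Int)) (i j : Int) : Int :=
  match PySem.List.pyGet? m i with
  | none => 0
  | some row => (PySem.List.pyGet? row j).getD 0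

def pvSetCell (m : List (List Int)) (i j v : Int) : List (List Int) :=
  match PySem.List.pyIdx? m.length i with
  | none => m
  | some k =>
    match m[k]? with
    | none => m
    | some row =>
      match PySem.List.pyIdx? row.length j with
      | none => m
      | some l => m.set k (row.set l v)

-- the if/elif/else column-wraparound of A's dfs (j = -1 → last column, j = cols → 0)
def pvWrap (cols t : Int) : Int :=
  if t = -1 then cols - 1 else if t = cols then 0 else t

-- number of nonzero cells: termination measure (fuel for A's recursion, WF measure for B's loop)
def pvRowNz (r : List Int) : Nat := r.countP (fun x => x != 0)
def pvNz (m : List (List Int)) : Nat := (m.map pvRowNz).sum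

-- A's recursive dfs; the fuel only makes the recursion structural — `pvNz m + 1` at the
-- call site always suffices (each recursive level below a live cell zeroes one cell first)
def pvDfs : Nat → List (List Int) → Int → Int → List (List Int) × Int
  | 0, m, _, _ => (m, 0)
  | fuel + 1, m, i, j =>
    if pvGetCell m i j = 0 then (m, 0)
    else
      ([((1 : Int), (0 : Int)), (-1, 0), (0, 1), (0, -1)]).foldl
        (fun (s : List (List Int) × Int) di =>
          if 0 ≤ i + di.1 ∧ i + di.1 < (s.1.length : Int) then
            let cols : Int := (s.1.headD []).length
            let r := pvDfs fuel s.1 (i + di.1) (pvWrap cols (j + di.2))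
            (r.1, s.2 + r.2)
          else s)
        (pvSetCell m i j 0, 1)

def size_island (matrix : List (List Int)) : List Int :=
  ((PySem.List.pyRange 0 (matrix.length : Int)).foldl
    (fun (st : List (List Int) × List Int) i =>
      (PySem.List.pyRange 0 ((st.1.headD []).length : Int)).foldl
        (fun st2 j =>
          if pvGetCell st2.1 i j = 1 then
            let r := pvDfs (pvNz st2.1 + 1) st2.1 i j
            (r.1, st2.2 ++ [r.2])
          else st2) st)
    (matrix, [])).2

-- ===== PORT B =====
-- lemma needed by pvFlood's termination (one live cell is zeroed on every counting pop)
theorem pvRowNz_set_lt (r : List Int) (k : Nat) (v : Int)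
    (hget : r[k]? = some v) (hv : v ≠ 0) : pvRowNz (r.set k 0) < pvRowNz r := by
  induction r generalizing k with
  | nil => simp at hget
  | cons a t ih =>
    cases k with
    | zero =>
      simp at hget; subst hget
      simp [pvRowNz, hv]
    | succ k =>
      simp at hget
      have := ih k hget
      simp only [List.set, pvRowNz, List.countP_cons] at *
      omega

theorem pvSum_set_lt (l : List Nat) (k : Nat) (a b : Nat)
    (hget : l[k]? = some b) (hab : a < b) : (l.set k a).sum < l.sum := by
  induction l generalizing k with
  | nil => simp at hget
  | cons x t ih =>
    cases k with
    | zero => simp at hget; subst hget; simp; omega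
    | succ k =>
      simp at hget
      have := ih k hget
      simp only [List.set, List.sum_cons]
      omega

theorem pvNz_set_lt (m : List (List Int)) (i j : Int)
    (h : pvGetCell m i j ≠ 0) : pvNz (pvSetCell m i j 0) < pvNz m := by
  unfold pvGetCell at h
  unfold pvSetCell
  simp only [PySem.List.pyGet?] at h
  cases hk : PySem.List.pyIdx? m.length i with
  | none => simp [hk] at h
  | some k =>
    simp only [hk, Option.bind_some] at h
    cases hrow : m[k]? with
    | none => simp [hrow] at h
    | some row =>
      simp only [hrow] at h
      cases hl : PySem.List.pyIdx? row.length j with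
      | none => simp [hl] at h
      | some l =>
        simp only [hl, Option.bind_some] at h
        cases hv : row[l]? with
        | none => simp [hv] at h
        | some v =>
          simp only [hv, Option.getD_some] at h
          unfold pvNz
          simp only [hrow, hl]
          rw [List.map_set]
          refine pvSum_set_lt _ k _ (pvRowNz row) ?_ ?_
          · simp [hrow]
          · exact pvRowNz_set_lt row l v hv h

-- B's iterative flood fill with an explicit stack (head of the list = top of the stack)
def pvFlood (rows : Int) (m : List (List Int)) (st : List (Int × Int)) (size : Int) :
    List (List Int) × Int :=
  match st with
  | [] => (m, size)
  | (x, y) :: rest =>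
    if h : pvGetCell m x y = 0 then pvFlood rows m rest size
    else
      let m0 := pvSetCell m x y 0
      let cols : Int := (m0.headD []).length
      pvFlood rows m0
        (([((0 : Int), (-1 : Int)), (0, 1), (-1, 0), (1, 0)]).foldl
          (fun s d =>
            if 0 ≤ x + d.1 ∧ x + d.1 < rows then (x + d.1, PySem.Int.mod (y + d.2) cols) :: s
            else s)
          rest)
        (size + 1)
  termination_by (pvNz m, st.length)
  decreasing_by
  · exact Prod.Lex.right _ (Nat.lt_succ_self _)
  · exact Prod.Lex.left _ _ (pvNz_set_lt m x y h)

def size_island_alt (matrix : List (List Int)) : List Int :=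
  let rows : Int := matrix.length
  ((PySem.List.pyRange 0 rows).foldl
    (fun (st : List (List Int) × List Int) i =>
      (PySem.List.pyRange 0 ((st.1.headD []).length : Int)).foldl
        (fun st2 j =>
          if pvGetCell st2.1 i j = 1 then
            let r := pvFlood rows st2.1 [(i, j)] 0
            (r.1, st2.2 ++ [r.2])
          else st2) st)
    (matrix, [])).2

-- ===== PRECONDITION & SPEC =====
-- Pre_ excludes exactly the matrices with a row shorter than row 0: there Python A's
-- row-major scan indexes past the short row and raises IndexError (it never returns).
def Pre_size_island (matrix : List (List Int)) : Prop :=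
  ∀ row ∈ matrix, (matrix.headD []).length ≤ row.length
instance (matrix : List (List Int)) : Decidable (Pre_size_island matrix) := by
  unfold Pre_size_island; infer_instance

def pvWitness_size_island : List (List Int) := [[1, 0], [1, 1]]

def Spec_size_island (matrix : List (List Int)) (out : List Int) : Prop :=
  out = size_island_alt matrix
instance (matrix : List (List Int)) (out : List Int) : Decidable (Spec_size_island matrix out) := by
  unfold Spec_size_island; infer_instance

-- ===== CLAIM (what is proved, stated in full; the proofs are below) =====
def Claim_equal_size_island : Prop :=
  ∀ (matrix : List (List Int)), Dom_size_island matrix → Pre_size_island matrix →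
    Spec_size_island matrix (size_island matrix)

-- ===== LEMMAS AND PROOFS =====

-- the multiset of row lengths is preserved by every cell write
theorem pvDims_set (m : List (List Int)) (i j v : Int) :
    (pvSetCell m i j v).map List.length = m.map List.length := by
  unfold pvSetCell
  cases hk : PySem.List.pyIdx? m.length i with
  | none => rfl
  | some k =>
    cases hrow : m[k]? with
    | none => simp [hrow]
    | some row =>
      cases hl : PySem.List.pyIdx? row.length j with
      | none => simp [hrow, hl]
      | some l =>
        simp only [hrow, hl]
        rw [List.map_set]
        simp only [List.length_set]
        have : (m.map List.length)[k]? = some row.length := by simp [hrow]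
        have hklt : k < m.length := by
          by_contra hh
          simp [List.getElem?_eq_none (by omega : m.length ≤ k)] at hrow
        calc (m.map List.length).set k row.length
            = (m.map List.length).set k ((m.map List.length).getD k 0) := by
              simp [List.getD, this]
          _ = m.map List.length := by
              apply List.ext_getElem?
              intro n
              by_cases hn : n = k
              · subst hn; simp [List.getD, hklt]
              · simp [List.getElem?_set_ne (fun h => hn h.symm)]

-- dims and nz through pvDfs
theorem pvDfs_dims_nz (fuel : Nat) (m : List (List Int)) (i j : Int) :
    (pvDfs fuel m i j).1.map List.length = m.map List.length ∧
    pvNz (pvDfs fuel m i j).1 ≤ pvNz m := by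
  induction fuel generalizing m i j with
  | zero => simp [pvDfs]
  | succ fuel ih =>
    rw [pvDfs]
    by_cases h : pvGetCell m i j = 0
    · simp [h]
    · rw [if_neg h]
      have base : (pvSetCell m i j 0).map List.length = m.map List.length ∧
          pvNz (pvSetCell m i j 0) ≤ pvNz m :=
        ⟨pvDims_set m i j 0, le_of_lt (pvNz_set_lt m i j h)⟩
      -- fold over the four directions preserves the invariant
      generalize hds : ([((1 : Int), (0 : Int)), (-1, 0), (0, 1), (0, -1)]) = ds
      clear hds
      generalize hs : (pvSetCell m i j 0, (1 : Int)) = s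
      have hbase : s.1.map List.length = m.map List.length ∧ pvNz s.1 ≤ pvNz m := by
        rw [← hs]; exact base
      clear hs base
      induction ds generalizing s with
      | nil => exact hbase
      | cons d ds ihds =>
        simp only [List.foldl]
        apply ihds
        by_cases hc : 0 ≤ i + d.1 ∧ i + d.1 < (s.1.length : Int)
        · rw [if_pos hc]
          have := ih s.1 (i + d.1) (pvWrap ((s.1.headD []).length : Int) (j + d.2))
          exact ⟨this.1.trans hbase.1, le_trans this.2 hbase.2⟩
        · rw [if_neg hc]; exact hbase

-- named copies of the anonymous step functions of the two ports (definitionally equal)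
def pvStepA (fuel : Nat) (i j : Int) (s : List (List Int) × Int) (di : Int × Int) :
    List (List Int) × Int :=
  if 0 ≤ i + di.1 ∧ i + di.1 < (s.1.length : Int) then
    let cols : Int := (s.1.headD []).length
    let r := pvDfs fuel s.1 (i + di.1) (pvWrap cols (j + di.2))
    (r.1, s.2 + r.2)
  else s

def pvCellA (i : Int) (st2 : List (List Int) × List Int) (j : Int) : List (List Int) × List Int :=
  if pvGetCell st2.1 i j = 1 then
    let r := pvDfs (pvNz st2.1 + 1) st2.1 i j
    (r.1, st2.2 ++ [r.2])
  else st2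

def pvOuterA (st : List (List Int) × List Int) (i : Int) : List (List Int) × List Int :=
  (PySem.List.pyRange 0 ((st.1.headD []).length : Int)).foldl (pvCellA i) st

def pvCellB (R i : Int) (st2 : List (List Int) × List Int) (j : Int) : List (List Int) × List Int :=
  if pvGetCell st2.1 i j = 1 then
    let r := pvFlood R st2.1 [(i, j)] 0
    (r.1, st2.2 ++ [r.2])
  else st2

def pvOuterB (R : Int) (st : List (List Int) × List Int) (i : Int) : List (List Int) × List Int :=
  (PySem.List.pyRange 0 ((st.1.headD []).length : Int)).foldl (pvCellB R i) st

theorem pvDfs_succ (F : Nat) (m : List (List Int)) (i j : Int) :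
    pvDfs (F + 1) m i j =
      if pvGetCell m i j = 0 then (m, 0)
      else ([((1 : Int), (0 : Int)), (-1, 0), (0, 1), (0, -1)]).foldl
        (pvStepA F i j) (pvSetCell m i j 0, 1) := rfl

theorem size_island_eq (matrix : List (List Int)) :
    size_island matrix =
      ((PySem.List.pyRange 0 (matrix.length : Int)).foldl pvOuterA (matrix, [])).2 := rfl

theorem size_island_alt_eq (matrix : List (List Int)) :
    size_island_alt matrix =
      ((PySem.List.pyRange 0 (matrix.length : Int)).foldl
        (pvOuterB (matrix.length : Int)) (matrix, [])).2 := rfl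

theorem pvFlood_nil (R : Int) (m : List (List Int)) (size : Int) :
    pvFlood R m [] size = (m, size) := by rw [pvFlood]

theorem pvFlood_cons (R : Int) (m : List (List Int)) (x y : Int) (rest : List (Int × Int))
    (size : Int) :
    pvFlood R m ((x, y) :: rest) size =
      if pvGetCell m x y = 0 then pvFlood R m rest size
      else
        pvFlood R (pvSetCell m x y 0)
          (([((0 : Int), (-1 : Int)), (0, 1), (-1, 0), (1, 0)]).foldl
            (fun s d =>
              if 0 ≤ x + d.1 ∧ x + d.1 < R then
                (x + d.1, PySem.Int.mod (y + d.2) ((((pvSetCell m x y 0).headD []).length : Nat) : Int)) :: s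
              else s)
            rest)
          (size + 1) := by
  rw [pvFlood]
  split <;> rfl

theorem pvCols_eq (m : List (List Int)) (D : List Nat) (h : m.map List.length = D) :
    (m.headD []).length = D.headD 0 := by
  subst h; cases m <;> simp

theorem pvLen_eq (m : List (List Int)) (D : List Nat) (h : m.map List.length = D) :
    m.length = D.length := by subst h; simp

theorem pvMod_wrap (cols t : Int) (hc : 0 < cols) (h1 : -1 ≤ t) (h2 : t ≤ cols) :
    PySem.Int.mod t cols = pvWrap cols t := by
  rw [PySem.Int.mod_eq_emod_of_pos hc]
  unfold pvWrap
  split_ifs with ha hb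
  · subst ha
    have h : (-1 : Int) = (cols - 1) - cols := by ring
    rw [h, Int.sub_emod_right]
    exact Int.emod_eq_of_lt (by omega) (by omega)
  · subst hb
    simp
  · exact Int.emod_eq_of_lt (by omega) (by omega)

-- the list of stack pushes B performs after zeroing a cell, in pop order
def pvPush (R cols i j : Int) : List (Int × Int) → List (Int × Int)
  | [] => []
  | d :: ds =>
    (if 0 ≤ i + d.1 ∧ i + d.1 < R then [(i + d.1, pvWrap cols (j + d.2))] else []) ++
      pvPush R cols i j ds

theorem pvFoldA_shift (F : Nat) (i j : Int) (ds : List (Int × Int)) (m : List (List Int))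
    (a : Int) :
    ds.foldl (pvStepA F i j) (m, a) =
      ((ds.foldl (pvStepA F i j) (m, 0)).1, a + (ds.foldl (pvStepA F i j) (m, 0)).2) := by
  induction ds generalizing m a with
  | nil => simp
  | cons d ds ih =>
    simp only [List.foldl, pvStepA]
    split_ifs with hc
    · rw [ih (pvDfs F m (i + d.1) (pvWrap ((m.headD []).length : Int) (j + d.2))).1
            (a + (pvDfs F m (i + d.1) (pvWrap ((m.headD []).length : Int) (j + d.2))).2),
          ih (pvDfs F m (i + d.1) (pvWrap ((m.headD []).length : Int) (j + d.2))).1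
            (0 + (pvDfs F m (i + d.1) (pvWrap ((m.headD []).length : Int) (j + d.2))).2)]
      simp only [Prod.mk.injEq]
      exact ⟨by simp, by ring⟩
    · exact ih m a

theorem pvChainSim (F : Nat) (R cols : Int) (D : List Nat)
    (hRD : R = (D.length : Int)) (hcolsD : cols = ((D.headD 0 : Nat) : Int))
    (IH : ∀ (m : List (List Int)) (i j : Int) (st : List (Int × Int)) (size : Int),
        pvNz m + 1 ≤ F → 0 ≤ j → j < ((m.headD []).length : Int) → R = (m.length : Int) →
        pvFlood R m ((i, j) :: st) size
          = pvFlood R (pvDfs F m i j).1 st (size + (pvDfs F m i j).2))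
    (i j : Int) :
    ∀ (ds : List (Int × Int)) (m : List (List Int)) (st : List (Int × Int)) (size : Int),
      m.map List.length = D → pvNz m + 1 ≤ F →
      (∀ d ∈ ds, 0 ≤ pvWrap cols (j + d.2) ∧ pvWrap cols (j + d.2) < cols) →
      pvFlood R m (pvPush R cols i j ds ++ st) size
        = pvFlood R (ds.foldl (pvStepA F i j) (m, 0)).1 st
            (size + (ds.foldl (pvStepA F i j) (m, 0)).2) := by
  intro ds
  induction ds with
  | nil => intro m st size _ _ _; simp [pvPush]
  | cons d ds ihds =>
    intro m st size hdm hnz hds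
    have hlen : ((m.length : Nat) : Int) = R := by
      rw [hRD, pvLen_eq m D hdm]
    have hcols : (((m.headD []).length : Nat) : Int) = cols := by
      rw [hcolsD, pvCols_eq m D hdm]
    simp only [pvPush, List.foldl]
    by_cases hc : 0 ≤ i + d.1 ∧ i + d.1 < R
    · have hstep : pvStepA F i j (m, 0) d =
          ((pvDfs F m (i + d.1) (pvWrap cols (j + d.2))).1,
            0 + (pvDfs F m (i + d.1) (pvWrap cols (j + d.2))).2) := by
        simp only [pvStepA, hlen, hcols, if_pos hc]
      rw [if_pos hc, hstep]
      have hb := hds d (List.mem_cons_self)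
      have h1 : pvFlood R m ((i + d.1, pvWrap cols (j + d.2)) :: (pvPush R cols i j ds ++ st)) size
          = pvFlood R (pvDfs F m (i + d.1) (pvWrap cols (j + d.2))).1
              (pvPush R cols i j ds ++ st)
              (size + (pvDfs F m (i + d.1) (pvWrap cols (j + d.2))).2) := by
        apply IH
        · exact hnz
        · exact hb.1
        · rw [hcols]; exact hb.2
        · exact hlen.symm
      simp only [List.singleton_append, List.cons_append, List.nil_append, List.append_assoc] at h1 ⊢
      rw [h1]
      have hdims' := (pvDfs_dims_nz F m (i + d.1) (pvWrap cols (j + d.2))).1.trans hdm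
      have hnz' : pvNz (pvDfs F m (i + d.1) (pvWrap cols (j + d.2))).1 + 1 ≤ F := by
        have := (pvDfs_dims_nz F m (i + d.1) (pvWrap cols (j + d.2))).2
        omega
      rw [ihds _ st _ hdims' hnz' (fun d' hd' => hds d' (List.mem_cons_of_mem d hd'))]
      rw [pvFoldA_shift F i j ds _ (0 + (pvDfs F m (i + d.1) (pvWrap cols (j + d.2))).2)]
      congr 1
      ring
    · have hstep : pvStepA F i j (m, 0) d = (m, 0) := by
        simp only [pvStepA, hlen, if_neg hc]
      rw [if_neg hc, hstep]
      simp only [List.nil_append]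
      exact ihds m st size hdm hnz (fun d' hd' => hds d' (List.mem_cons_of_mem d hd'))

theorem pvSim (F : Nat) :
    ∀ (m : List (List Int)) (i j : Int) (st : List (Int × Int)) (size : Int) (R : Int),
      pvNz m + 1 ≤ F → 0 ≤ j → j < ((m.headD []).length : Int) → R = (m.length : Int) →
      pvFlood R m ((i, j) :: st) size
        = pvFlood R (pvDfs F m i j).1 st (size + (pvDfs F m i j).2) := by
  induction F with
  | zero => intro m i j st size R hnz _ _ _; omega
  | succ F ihF =>
    intro m i j st size R hnz hj0 hjc hR
    rw [pvFlood_cons]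
    by_cases h : pvGetCell m i j = 0
    · rw [if_pos h, pvDfs_succ, if_pos h]
      simp
    · rw [if_neg h, pvDfs_succ, if_neg h]
      have hd0 : (pvSetCell m i j 0).map List.length = m.map List.length := pvDims_set m i j 0
      have hnz0 : pvNz (pvSetCell m i j 0) < pvNz m := pvNz_set_lt m i j h
      have hc0 : (0 : Int) < ((m.headD []).length : Int) := lt_of_le_of_lt hj0 hjc
      have hcols0 : ((((pvSetCell m i j 0).headD []).length : Nat) : Int)
          = ((m.headD []).length : Int) := by
        exact_mod_cast congrArg (Nat.cast : Nat → Int)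
          ((pvCols_eq _ _ hd0).trans (pvCols_eq m (m.map List.length) rfl).symm)
      -- turn B's stack pushes into pvPush of A's direction list
      have hstB : (([((0 : Int), (-1 : Int)), (0, 1), (-1, 0), (1, 0)]).foldl
            (fun s d =>
              if 0 ≤ i + d.1 ∧ i + d.1 < R then
                (i + d.1, PySem.Int.mod (j + d.2) ((((pvSetCell m i j 0).headD []).length : Nat) : Int)) :: s
              else s)
            st)
          = pvPush R ((m.headD []).length : Int) i j
              [((1 : Int), (0 : Int)), (-1, 0), (0, 1), (0, -1)] ++ st := by
        simp only [List.foldl, pvPush, hcols0]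
        rw [pvMod_wrap ((m.headD []).length : Int) (j + 0) hc0 (by omega) (by omega)]
        rw [pvMod_wrap ((m.headD []).length : Int) (j + 1) hc0 (by omega) (by omega)]
        rw [pvMod_wrap ((m.headD []).length : Int) (j + -1) hc0 (by omega) (by omega)]
        split_ifs <;> simp
      rw [hstB]
      have hbounds : ∀ d ∈ [((1 : Int), (0 : Int)), (-1, 0), (0, 1), (0, -1)],
          0 ≤ pvWrap ((m.headD []).length : Int) (j + d.2) ∧
            pvWrap ((m.headD []).length : Int) (j + d.2) < ((m.headD []).length : Int) := by
        intro d hd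
        fin_cases hd <;> (unfold pvWrap; constructor <;> (split_ifs <;> omega))
      rw [pvChainSim F R ((m.headD []).length : Int) (m.map List.length)
            (by rw [hR]; simp) (by exact_mod_cast congrArg (Nat.cast : Nat → Int) (pvCols_eq m (m.map List.length) rfl))
            (fun m' i' j' st' size' h1 h2 h3 h4 => ihF m' i' j' st' size' R h1 h2 h3 h4)
            i j _ (pvSetCell m i j 0) st (size + 1) hd0 (by omega) hbounds]
      rw [pvFoldA_shift F i j _ (pvSetCell m i j 0) 1]
      congr 1
      ring

theorem pvInnerSim (R : Int) (D : List Nat) (hRD : R = (D.length : Int)) (i : Int) :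
    ∀ (js : List Int) (st : List (List Int) × List Int),
      st.1.map List.length = D →
      (∀ j ∈ js, 0 ≤ j ∧ j < ((D.headD 0 : Nat) : Int)) →
      js.foldl (pvCellB R i) st = js.foldl (pvCellA i) st ∧
        (js.foldl (pvCellA i) st).1.map List.length = D := by
  intro js
  induction js with
  | nil => intro st hdm _; exact ⟨rfl, hdm⟩
  | cons j js ih =>
    intro st hdm hjs
    have hcols : (((st.1.headD []).length : Nat) : Int) = ((D.headD 0 : Nat) : Int) := by
      exact_mod_cast congrArg (Nat.cast : Nat → Int) (pvCols_eq st.1 D hdm)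
    have hlen : R = ((st.1.length : Nat) : Int) := by
      rw [hRD, pvLen_eq st.1 D hdm]
    simp only [List.foldl]
    by_cases h : pvGetCell st.1 i j = 1
    · have hb := hjs j (List.mem_cons_self)
      have hsim := pvSim (pvNz st.1 + 1) st.1 i j [] 0 R le_rfl hb.1
        (by rw [hcols]; exact hb.2) hlen
      rw [pvFlood_nil] at hsim
      have hcell : pvCellB R i st j = pvCellA i st j := by
        simp only [pvCellB, pvCellA, if_pos h, hsim]
        simp
      rw [hcell]
      have hdm' : (pvCellA i st j).1.map List.length = D := by
        simp only [pvCellA, if_pos h]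
        exact (pvDfs_dims_nz (pvNz st.1 + 1) st.1 i j).1.trans hdm
      exact ih (pvCellA i st j) hdm' (fun j' hj' => hjs j' (List.mem_cons_of_mem j hj'))
    · have hcell : pvCellB R i st j = st := by simp [pvCellB, h]
      have hcell' : pvCellA i st j = st := by simp [pvCellA, h]
      rw [hcell, hcell']
      exact ih st hdm (fun j' hj' => hjs j' (List.mem_cons_of_mem j hj'))

theorem pvOuterSim (R : Int) (D : List Nat) (hRD : R = (D.length : Int)) :
    ∀ (is : List Int) (st : List (List Int) × List Int),
      st.1.map List.length = D →
      is.foldl (pvOuterB R) st = is.foldl pvOuterA st ∧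
        (is.foldl pvOuterA st).1.map List.length = D := by
  intro is
  induction is with
  | nil => intro st hdm; exact ⟨rfl, hdm⟩
  | cons i is ih =>
    intro st hdm
    have hcols : (((st.1.headD []).length : Nat) : Int) = ((D.headD 0 : Nat) : Int) := by
      exact_mod_cast congrArg (Nat.cast : Nat → Int) (pvCols_eq st.1 D hdm)
    have hinner := pvInnerSim R D hRD i
      (PySem.List.pyRange 0 ((st.1.headD []).length : Int)) st hdm
      (by
        intro j hj
        have := PySem.List.mem_pyRange_one.mp hj
        constructor
        · exact this.1
        · rw [← hcols]; exact this.2)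
    simp only [List.foldl]
    have hOB : pvOuterB R st i = pvOuterA st i := by
      simp only [pvOuterB, pvOuterA]
      exact hinner.1
    rw [hOB]
    have hdm' : (pvOuterA st i).1.map List.length = D := hinner.2
    exact ih (pvOuterA st i) hdm'

-- ===== VERDICT (by name: the statement is the Claim_ definition above) =====
theorem size_island_spec : Claim_equal_size_island := by
  intro matrix _hdom _hpre
  unfold Spec_size_island
  rw [size_island_eq, size_island_alt_eq]
  rw [(pvOuterSim (matrix.length : Int) (matrix.map List.length) (by simp)
    (PySem.List.pyRange 0 (matrix.length : Int)) (matrix, []) rfl).1]
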